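-- pv_equiv track=rewrite | github.com/kgukevin/tjhsst | Artificial Intelligence I & II (2018-19)/Labs/Lab6 NQueens/NQueens.py | get_sorted_values
-- ===== SOURCE A (Python) =====
-- def get_sorted_values(state, var):
--     values = {num for num in range(0, len(state))}
--     for x in range(0, len(state)):
--         if state[x] != -1:
--             if state[x] in values:
--                 values.remove(state[x])
--             target = state[x]
--             if target + (var - x) in values:
--                 values.remove(target + (var - x))
--             if target - (var - x) in values:
--                 values.remove(target - (var - x))
--     return values
-- ===== SOURCE B (Python) =====
-- def get_sorted_values(state, var):
--     cols = set()
--     diag_down = set()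
--     diag_up = set()
--     for x, s in enumerate(state):
--         if s != -1:
--             cols.add(s)
--             diag_down.add(s - x)
--             diag_up.add(s + x)
--     return {num for num in range(len(state))
--             if num not in cols
--             and num - var not in diag_down
--             and num + var not in diag_up}
-- ===== Notes on version B (the rewrite author's own statement) =====
-- stated objective: alternative
-- what changed: B replaces A's 'start with the full candidate set and destructively remove the three conflict values per queen' loop by one pass that indexes the placed queens into three sets keyed by column and by the two diagonal invariants (s-x, s+x), then builds the result by testing each candidate with three membership lookups.
import Mathlib
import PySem

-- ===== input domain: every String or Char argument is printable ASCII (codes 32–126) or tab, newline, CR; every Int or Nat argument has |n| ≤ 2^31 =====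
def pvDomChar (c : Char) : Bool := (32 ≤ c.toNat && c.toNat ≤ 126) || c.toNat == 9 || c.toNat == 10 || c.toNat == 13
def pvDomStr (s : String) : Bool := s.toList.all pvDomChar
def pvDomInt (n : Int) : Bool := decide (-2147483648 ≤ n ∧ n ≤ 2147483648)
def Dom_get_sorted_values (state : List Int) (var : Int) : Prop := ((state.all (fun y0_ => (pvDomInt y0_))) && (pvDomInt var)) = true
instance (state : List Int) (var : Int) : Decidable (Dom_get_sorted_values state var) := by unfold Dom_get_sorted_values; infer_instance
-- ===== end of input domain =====

-- B: same result computed by indexing the placed queens once into three sets (column and the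
-- two diagonal invariants s-x, s+x) and testing each candidate by membership, instead of A's
-- destructive per-queen removals from the full candidate set.
-- ===== PORT A =====
-- Python's guarded 'if v in values: values.remove(v)' is ported as the same guarded removal;
-- under the guard, set.remove equals PySem.Set.discard.
def get_sorted_values (state : List Int) (var : Int) : List Int :=
  let values : PySem.Set Int := PySem.Set.ofList (PySem.List.pyRange 0 (state.length : Int) 1)
  (PySem.List.pyRange 0 (state.length : Int) 1).foldl (fun values x =>
    if PySem.List.pyGetD state x 0 ≠ -1 then
      let values1 :=
        if PySem.Set.contains values (PySem.List.pyGetD state x 0) then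
          PySem.Set.discard values (PySem.List.pyGetD state x 0)
        else values
      let target := PySem.List.pyGetD state x 0
      let values2 :=
        if PySem.Set.contains values1 (target + (var - x)) then
          PySem.Set.discard values1 (target + (var - x))
        else values1
      if PySem.Set.contains values2 (target - (var - x)) then
        PySem.Set.discard values2 (target - (var - x))
      else values2
    else values) values

-- ===== PORT B =====
-- one step of Source B's 'for x, s in enumerate(state)' loop over the triple (cols, diag_down, diag_up)
def pvAddQueen (acc : PySem.Set Int × PySem.Set Int × PySem.Set Int) (p : Int × Int) :
    PySem.Set Int × PySem.Set Int × PySem.Set Int :=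
  if p.2 ≠ -1 then
    (PySem.Set.add acc.1 p.2, PySem.Set.add acc.2.1 (p.2 - p.1), PySem.Set.add acc.2.2 (p.2 + p.1))
  else acc

-- Source B's loop: the three sets built from the placed queens
def pvQueenSets (state : List Int) : PySem.Set Int × PySem.Set Int × PySem.Set Int :=
  (PySem.List.enumerate state 0).foldl pvAddQueen (PySem.Set.empty, PySem.Set.empty, PySem.Set.empty)

def get_sorted_values_alt (state : List Int) (var : Int) : List Int :=
  (PySem.List.pyRange 0 (state.length : Int) 1).filter (fun num =>
    !(PySem.Set.contains (pvQueenSets state).1 num)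
    && !(PySem.Set.contains (pvQueenSets state).2.1 (num - var))
    && !(PySem.Set.contains (pvQueenSets state).2.2 (num + var)))

-- ===== PRECONDITION & SPEC =====
def Spec_get_sorted_values (state : List Int) (var : Int) (out : List Int) : Prop := out = get_sorted_values_alt state var
instance (state : List Int) (var : Int) (out : List Int) : Decidable (Spec_get_sorted_values state var out) := by unfold Spec_get_sorted_values; infer_instance

-- ===== CLAIM (what is proved, stated in full; the proofs are below) =====
def Claim_equal_get_sorted_values : Prop := ∀ (state : List Int) (var : Int), Dom_get_sorted_values state var → Spec_get_sorted_values state var (get_sorted_values state var)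

-- ===== LEMMAS AND PROOFS =====

-- the per-queen conflict test of B's comprehension
def pvConflictFree (state : List Int) (var : Int) (x num : Int) : Bool :=
  (PySem.List.pyGetD state x 0 == -1)
  || ((PySem.List.pyGetD state x 0 != num)
      && (PySem.List.pyGetD state x 0 + (var - x) != num)
      && (PySem.List.pyGetD state x 0 - (var - x) != num))

theorem guarded_discard_eq_filter (s : PySem.Set Int) (v : Int) :
    (if PySem.Set.contains s v then PySem.Set.discard s v else s)
      = s.filter (fun y => !(y == v)) := by
  by_cases h : PySem.Set.contains s v = true
  · rw [if_pos h]; rfl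
  · rw [if_neg h]
    refine (List.filter_eq_self.2 ?_).symm
    intro a ha
    simp only [PySem.Set.contains, List.contains_eq_mem, decide_eq_true_eq] at h
    simp only [Bool.not_eq_eq_eq_not, Bool.not_true, beq_eq_false_iff_ne, ne_eq]
    intro hav; exact h (hav ▸ ha)

theorem step_eq_filter (state : List Int) (var : Int) (s : PySem.Set Int) (x : Int) :
    (if PySem.List.pyGetD state x 0 ≠ -1 then
      let values1 :=
        if PySem.Set.contains s (PySem.List.pyGetD state x 0) then
          PySem.Set.discard s (PySem.List.pyGetD state x 0)
        else s
      let target := PySem.List.pyGetD state x 0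
      let values2 :=
        if PySem.Set.contains values1 (target + (var - x)) then
          PySem.Set.discard values1 (target + (var - x))
        else values1
      if PySem.Set.contains values2 (target - (var - x)) then
        PySem.Set.discard values2 (target - (var - x))
      else values2
    else s) = s.filter (pvConflictFree state var x) := by
  by_cases h : PySem.List.pyGetD state x 0 = -1
  · simp only [h, ne_eq, not_true_eq_false, if_false]
    refine (List.filter_eq_self.2 ?_).symm
    intro a _; simp [pvConflictFree, h]
  · simp only [h, ne_eq, not_false_eq_true, if_true]
    rw [guarded_discard_eq_filter, guarded_discard_eq_filter, guarded_discard_eq_filter,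
      List.filter_filter, List.filter_filter]
    refine List.filter_congr ?_
    intro a _
    simp only [pvConflictFree]
    rw [Bool.eq_iff_iff]
    simp only [Bool.and_eq_true, Bool.or_eq_true, Bool.not_eq_eq_eq_not, Bool.not_true,
      beq_eq_false_iff_ne, ne_eq, bne_iff_ne, beq_iff_eq]
    omega

theorem foldl_filter_eq_filter_all (p : Int → Int → Bool) (l s : List Int) :
    l.foldl (fun s x => s.filter (p x)) s
      = s.filter (fun num => l.all (fun x => p x num)) := by
  induction l generalizing s with
  | nil => simp
  | cons x l ih =>
      simp only [List.foldl_cons, ih, List.filter_filter, List.all_cons]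
      exact List.filter_congr (fun a _ => by rw [Bool.and_comm])

theorem ofList_eq_self_of_nodup (xs : List Int) (h : xs.Nodup) :
    PySem.Set.ofList xs = xs := by
  have key : ∀ (ys s : List Int), ys.Nodup → (∀ a ∈ ys, a ∉ s) →
      ys.foldl PySem.Set.add s = s ++ ys := by
    intro ys
    induction ys with
    | nil => intro s _ _; simp
    | cons y ys ih =>
        intro s hnd hdis
        have hy : y ∉ s := hdis y (by simp)
        have : PySem.Set.add s y = s ++ [y] := by
          simp [PySem.Set.add, PySem.Set.contains]
          intro hc; exact absurd (by simpa using hc) hy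
        simp only [List.foldl_cons, this]
        rw [ih (s ++ [y]) hnd.of_cons]
        · simp
        · intro a ha
          simp only [List.mem_append, List.mem_singleton]
          rintro (h1 | h1)
          · exact hdis a (by simp [ha]) h1
          · exact (List.nodup_cons.1 hnd).1 (h1 ▸ ha)
  simpa [PySem.Set.ofList, PySem.Set.empty] using key xs [] h (by simp)

theorem foldl_comp1 (l : List (Int × Int)) (acc : PySem.Set Int × PySem.Set Int × PySem.Set Int) :
    (l.foldl pvAddQueen acc).1
      = l.foldl (fun s p => if p.2 ≠ -1 then PySem.Set.add s p.2 else s) acc.1 := by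
  induction l generalizing acc with
  | nil => rfl
  | cons p l ih =>
      simp only [List.foldl_cons, ih]
      congr 1
      simp only [pvAddQueen]
      split <;> rfl

theorem foldl_comp2 (l : List (Int × Int)) (acc : PySem.Set Int × PySem.Set Int × PySem.Set Int) :
    (l.foldl pvAddQueen acc).2.1
      = l.foldl (fun s p => if p.2 ≠ -1 then PySem.Set.add s (p.2 - p.1) else s) acc.2.1 := by
  induction l generalizing acc with
  | nil => rfl
  | cons p l ih =>
      simp only [List.foldl_cons, ih]
      congr 1
      simp only [pvAddQueen]
      split <;> rfl

theorem foldl_comp3 (l : List (Int × Int)) (acc : PySem.Set Int × PySem.Set Int × PySem.Set Int) :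
    (l.foldl pvAddQueen acc).2.2
      = l.foldl (fun s p => if p.2 ≠ -1 then PySem.Set.add s (p.2 + p.1) else s) acc.2.2 := by
  induction l generalizing acc with
  | nil => rfl
  | cons p l ih =>
      simp only [List.foldl_cons, ih]
      congr 1
      simp only [pvAddQueen]
      split <;> rfl

theorem mem_foldl_addIf (f : Int × Int → Int) (l : List (Int × Int)) (s : PySem.Set Int)
    (v : Int) :
    (v ∈ l.foldl (fun s p => if p.2 ≠ -1 then PySem.Set.add s (f p) else s) s) ↔
      v ∈ s ∨ ∃ p ∈ l, p.2 ≠ -1 ∧ f p = v := by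
  induction l generalizing s with
  | nil => simp
  | cons q l ih =>
      by_cases hq : q.2 = -1
      · simp only [List.foldl_cons]
        rw [if_neg (show ¬(q.2 ≠ -1) by simp [hq]), ih]
        constructor
        · rintro (h | ⟨p, hp, hp2, hpf⟩)
          · exact Or.inl h
          · exact Or.inr ⟨p, List.mem_cons_of_mem _ hp, hp2, hpf⟩
        · rintro (h | ⟨p, hp, hp2, hpf⟩)
          · exact Or.inl h
          · rcases List.mem_cons.1 hp with rfl | hp'
            · exact absurd hq hp2
            · exact Or.inr ⟨p, hp', hp2, hpf⟩
      · simp only [List.foldl_cons, if_pos hq, ih, PySem.Set.mem_add, List.mem_cons]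
        constructor
        · rintro ((h | h) | ⟨p, hp, hp2, hpf⟩)
          · exact Or.inl h
          · exact Or.inr ⟨q, Or.inl rfl, hq, h.symm⟩
          · exact Or.inr ⟨p, Or.inr hp, hp2, hpf⟩
        · rintro (h | ⟨p, (rfl | hp), hp2, hpf⟩)
          · exact Or.inl (Or.inl h)
          · exact Or.inl (Or.inr hpf.symm)
          · exact Or.inr ⟨p, hp, hp2, hpf⟩

theorem alt_eq_filter (state : List Int) (var : Int) :
    get_sorted_values_alt state var
      = (PySem.List.pyRange 0 (state.length : Int) 1).filter
          (fun num => (PySem.List.pyRange 0 (state.length : Int) 1).all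
            (fun x => pvConflictFree state var x num)) := by
  unfold get_sorted_values_alt
  refine List.filter_congr ?_
  intro num _
  simp only [pvQueenSets]
  rw [Bool.eq_iff_iff]
  simp only [foldl_comp1, foldl_comp2, foldl_comp3, PySem.Set.contains, List.contains_eq_mem,
    Bool.and_eq_true, Bool.not_eq_eq_eq_not, Bool.not_true, decide_eq_false_iff_not,
    mem_foldl_addIf, PySem.Set.empty, List.not_mem_nil, false_or,
    PySem.List.enumerate_eq_map_pyRange state (0 : Int), PySem.List.len, List.mem_map]
  simp only [List.all_eq_true, pvConflictFree, Bool.or_eq_true, Bool.and_eq_true,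
    beq_iff_eq, bne_iff_ne, ne_eq]
  push Not
  constructor
  · rintro ⟨⟨h1, h2⟩, h3⟩ x hx
    have a1 := h1 (x, PySem.List.pyGetD state x 0) ⟨x, hx, rfl⟩
    have a2 := h2 (x, PySem.List.pyGetD state x 0) ⟨x, hx, rfl⟩
    have a3 := h3 (x, PySem.List.pyGetD state x 0) ⟨x, hx, rfl⟩
    dsimp only at a1 a2 a3
    omega
  · intro h
    refine ⟨⟨?_, ?_⟩, ?_⟩ <;>
      · rintro p ⟨x, hx, rfl⟩
        have := h x hx
        dsimp only
        omega

-- ===== VERDICT (by name: the statement is the Claim_ definition above) =====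
theorem get_sorted_values_spec : Claim_equal_get_sorted_values := by
  intro state var _
  unfold Spec_get_sorted_values get_sorted_values
  have hsteps :
      (PySem.List.pyRange 0 (state.length : Int) 1).foldl
        (fun values x =>
          if PySem.List.pyGetD state x 0 ≠ -1 then
            let values1 :=
              if PySem.Set.contains values (PySem.List.pyGetD state x 0) then
                PySem.Set.discard values (PySem.List.pyGetD state x 0)
              else values
            let target := PySem.List.pyGetD state x 0
            let values2 :=
              if PySem.Set.contains values1 (target + (var - x)) then
                PySem.Set.discard values1 (target + (var - x))
              else values1
            if PySem.Set.contains values2 (target - (var - x)) then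
              PySem.Set.discard values2 (target - (var - x))
            else values2
          else values)
        (PySem.Set.ofList (PySem.List.pyRange 0 (state.length : Int) 1))
      = (PySem.Set.ofList (PySem.List.pyRange 0 (state.length : Int) 1)).filter
          (fun num => (PySem.List.pyRange 0 (state.length : Int) 1).all
            (fun x => pvConflictFree state var x num)) := by
    have hfun :
        (fun (values : PySem.Set Int) (x : Int) =>
          if PySem.List.pyGetD state x 0 ≠ -1 then
            let values1 :=
              if PySem.Set.contains values (PySem.List.pyGetD state x 0) then
                PySem.Set.discard values (PySem.List.pyGetD state x 0)
              else values
            let target := PySem.List.pyGetD state x 0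
            let values2 :=
              if PySem.Set.contains values1 (target + (var - x)) then
                PySem.Set.discard values1 (target + (var - x))
              else values1
            if PySem.Set.contains values2 (target - (var - x)) then
              PySem.Set.discard values2 (target - (var - x))
            else values2
          else values)
        = (fun (s : PySem.Set Int) (x : Int) => s.filter (pvConflictFree state var x)) := by
      funext s x
      exact step_eq_filter state var s x
    rw [hfun, foldl_filter_eq_filter_all (pvConflictFree state var)]
  rw [hsteps, ofList_eq_self_of_nodup _ (PySem.List.nodup_pyRange_one 0 _), ← alt_eq_filter]
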